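-- pv_equiv track=rewrite | github.com/coperyan/mlb_videos | mlb_videos/utils.py | rank_dict_list
-- ===== SOURCE A (Python) =====
-- from itertools import groupby
--
-- def rank_dict_list(dl: list = None, order_by: list = None, asc: bool = False,
--                     partition_by: list = [], name: str = None):
--     """Pass list of dictionaries
--     Val = The Value you want to rank on
--     Asc = Ascending True, Desc False
--     Rank = True / False
--     Rank Key = String, will be added to dicts
--     """
--     dl_sorted = sorted(
--         dl,
--         key = lambda x: tuple((x[v] for v in partition_by + order_by)),
--         reverse = False if asc else True
--     )
--     if name:
--         if partition_by:
--             groups = groupby(dl_sorted, key = lambda x: tuple((x[v] for v in partition_by)))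
--             for k, group in groups:
--                 [d.update({name: (i+1)}) for i, d in enumerate(group)]
--         else:
--             [d.update({name: (i + 1)}) for i, d in enumerate(dl_sorted)]
--     return dl_sorted
-- ===== SOURCE B (Python) =====
-- def rank_dict_list(dl: list = None, order_by: list = None, asc: bool = False,
--                    partition_by: list = [], name: str = None):
--     """Same ranking, but ranks are assigned in one pass over the sorted list
--     using a dict of per-partition running counters instead of groupby."""
--     dl_sorted = sorted(
--         dl,
--         key=lambda x: tuple(x[v] for v in partition_by + order_by),
--         reverse=not asc,
--     )
--     if name:
--         counts = {}
--         for d in dl_sorted: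
--             k = tuple(d[v] for v in partition_by)
--             c = counts.get(k, 0) + 1
--             counts[k] = c
--             d[name] = c
--     return dl_sorted
-- ===== Notes on version B (the rewrite author's own statement) =====
-- stated objective: alternative
-- what changed: Rank assignment no longer materialises itertools.groupby runs: a single pass over the sorted list keeps a dict of per-partition-key running counters (the empty partition key unifies the global-enumeration branch), instead of grouping contiguous runs and enumerating each.
import Mathlib
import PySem

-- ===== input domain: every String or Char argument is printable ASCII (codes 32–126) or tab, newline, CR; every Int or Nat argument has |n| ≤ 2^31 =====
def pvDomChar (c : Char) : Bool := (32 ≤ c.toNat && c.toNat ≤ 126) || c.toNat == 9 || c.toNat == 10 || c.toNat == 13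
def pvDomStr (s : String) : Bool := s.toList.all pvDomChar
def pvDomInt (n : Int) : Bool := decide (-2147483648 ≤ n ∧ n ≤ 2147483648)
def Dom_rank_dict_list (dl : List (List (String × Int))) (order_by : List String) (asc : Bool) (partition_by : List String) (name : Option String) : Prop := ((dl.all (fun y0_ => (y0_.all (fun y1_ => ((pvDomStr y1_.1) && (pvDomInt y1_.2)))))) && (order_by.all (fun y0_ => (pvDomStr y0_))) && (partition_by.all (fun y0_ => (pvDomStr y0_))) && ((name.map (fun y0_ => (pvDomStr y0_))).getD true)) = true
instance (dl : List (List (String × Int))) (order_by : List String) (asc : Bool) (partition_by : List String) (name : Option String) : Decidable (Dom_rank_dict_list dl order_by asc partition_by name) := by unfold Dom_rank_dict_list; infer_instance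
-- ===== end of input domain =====

-- B replaces the itertools.groupby rank assignment with one pass over the sorted list keeping a
-- dict of per-partition-key running counters (objective: alternative; same cost). Both Pythons
-- mutate the dicts of dl in place; the equivalence proved here is about the RETURN value.

-- ===== PORT A =====
-- x[v]: under Pre_ the key is present, so the `.getD 0` default is never reached
-- (a missing key is Python's KeyError, excluded by Pre_).
def pvLook (d : List (String × Int)) (v : String) : Int :=
  ((PySem.Dict.mk d).get? v).getD 0

-- lambda x: tuple(x[v] for v in ks)
def pvKey (ks : List String) (d : List (String × Int)) : List Int :=
  ks.map (pvLook d)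

-- itertools.groupby(l, key = pk), each group materialised: consecutive runs of equal key
def pvRuns (pk : List (String × Int) → List Int) :
    List (List (String × Int)) → List (List (List (String × Int)))
  | [] => []
  | x :: xs =>
    (x :: xs.takeWhile (fun y => pk y == pk x)) ::
      pvRuns pk (xs.dropWhile (fun y => pk y == pk x))
termination_by l => l.length
decreasing_by
  have := List.length_dropWhile_le (fun y => pk y == pk x) xs
  simp only [List.length_cons]; omega

def rank_dict_list (dl : List (List (String × Int))) (order_by : List String) (asc : Bool) (partition_by : List String) (name : Option String) : List (List (String × Int)) :=
  let dl_sorted := PySem.List.sorted dl (pvKey (partition_by ++ order_by))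
      (if asc then false else true)
  match name with
  | none => dl_sorted
  | some s =>
    if s = "" then dl_sorted
    else if partition_by ≠ [] then
      -- for k, group in groupby(...): [d.update({name: i+1}) for i, d in enumerate(group)]
      (pvRuns (pvKey partition_by) dl_sorted).flatMap
        (fun g => (PySem.List.enumerate g 0).map
          (fun p => ((PySem.Dict.mk p.2).insert s (p.1 + 1)).items))
    else
      -- [d.update({name: i+1}) for i, d in enumerate(dl_sorted)]
      (PySem.List.enumerate dl_sorted 0).map
        (fun p => ((PySem.Dict.mk p.2).insert s (p.1 + 1)).items)

-- ===== PORT B =====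
def rank_dict_list_alt (dl : List (List (String × Int))) (order_by : List String) (asc : Bool) (partition_by : List String) (name : Option String) : List (List (String × Int)) :=
  let dl_sorted := PySem.List.sorted dl (pvKey (partition_by ++ order_by)) (!asc)
  match name with
  | none => dl_sorted
  | some s =>
    if s = "" then dl_sorted
    else
      -- counts = {}; for d in dl_sorted: k = pk(d); c = counts.get(k,0)+1; counts[k] = c; d[name] = c
      (dl_sorted.foldl
        (fun st d =>
          (st.1.insert (pvKey partition_by d) (st.1.getD (pvKey partition_by d) 0 + 1),
           st.2 ++ [((PySem.Dict.mk d).insert s (st.1.getD (pvKey partition_by d) 0 + 1)).items]))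
        ((PySem.Dict.empty : PySem.Dict (List Int) Int), [])).2

-- ===== PRECONDITION & SPEC =====
-- Pre_ excludes exactly the inputs where Python raises KeyError: some dict of dl lacks a key
-- listed in partition_by or order_by.
def Pre_rank_dict_list (dl : List (List (String × Int))) (order_by : List String) (asc : Bool) (partition_by : List String) (name : Option String) : Prop :=
  ∀ d ∈ dl, ∀ v ∈ partition_by ++ order_by, v ∈ d.map Prod.fst
instance (dl : List (List (String × Int))) (order_by : List String) (asc : Bool) (partition_by : List String) (name : Option String) : Decidable (Pre_rank_dict_list dl order_by asc partition_by name) := by unfold Pre_rank_dict_list; infer_instance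

def pvWitness_rank_dict_list : (List (List (String × Int))) × List String × Bool × List String × Option String :=
  ([[("a", 2)], [("a", 1)]], ["a"], true, [], some "r")

def Spec_rank_dict_list (dl : List (List (String × Int))) (order_by : List String) (asc : Bool) (partition_by : List String) (name : Option String) (out : List (List (String × Int))) : Prop := out = rank_dict_list_alt dl order_by asc partition_by name
instance (dl : List (List (String × Int))) (order_by : List String) (asc : Bool) (partition_by : List String) (name : Option String) (out : List (List (String × Int))) : Decidable (Spec_rank_dict_list dl order_by asc partition_by name out) := by unfold Spec_rank_dict_list; infer_instance

-- ===== CLAIM (what is proved, stated in full; the proofs are below) =====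
def Claim_equal_rank_dict_list : Prop := ∀ (dl : List (List (String × Int))) (order_by : List String) (asc : Bool) (partition_by : List String) (name : Option String), Dom_rank_dict_list dl order_by asc partition_by name → Pre_rank_dict_list dl order_by asc partition_by name → Spec_rank_dict_list dl order_by asc partition_by name (rank_dict_list dl order_by asc partition_by name)

-- ===== LEMMAS AND PROOFS =====

-- the pure specification both rank assignments meet: each dict receives
-- 1 + (number of earlier dicts with the same partition key), tracked by a counting function
def specRank (s : String) (pk : List (String × Int) → List Int) :
    List (List (String × Int)) → (List Int → Int) → List (List (String × Int))
  | [], _ => []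
  | d :: ds, c =>
      ((PySem.Dict.mk d).insert s (c (pk d) + 1)).items ::
        specRank s pk ds (fun k => if k = pk d then c k + 1 else c k)

-- lexicographic order on key tuples: a strict comparison of truncations lifts to the full tuples
lemma take_lt_of_lt : ∀ (p : Nat) (a b : List Int), a.take p < b.take p → a < b := by
  intro p
  induction p with
  | zero =>
    intro a b h
    rw [List.take_zero, List.take_zero] at h
    exact absurd h (lt_irrefl _)
  | succ p ih =>
    intro a b h
    cases a with
    | nil =>
      cases b with
      | nil => exact absurd h (lt_irrefl _)
      | cons y b' => exact List.nil_lt_cons y b'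
    | cons x a' =>
      cases b with
      | nil =>
        rw [List.take_nil] at h
        exact absurd h (by simp)
      | cons y b' =>
        rw [List.take_succ_cons, List.take_succ_cons] at h
        rcases List.cons_lt_cons_iff.mp h with h1 | ⟨h1, h2⟩
        · exact List.cons_lt_cons_iff.mpr (Or.inl h1)
        · exact List.cons_lt_cons_iff.mpr (Or.inr ⟨h1, ih _ _ h2⟩)

lemma take_le_of_le (p : Nat) (a b : List Int) (h : a ≤ b) : a.take p ≤ b.take p := by
  by_contra hc
  exact absurd (take_lt_of_lt p b a (not_le.mp hc)) (not_lt.mpr h)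

-- the partition key is the length-|pb| prefix of the full sort key
lemma pvKey_take (pb ob : List String) (d : List (String × Int)) :
    pvKey pb d = (pvKey (pb ++ ob) d).take pb.length := by
  unfold pvKey
  rw [List.map_append, List.take_left' (by simp)]

lemma enumerate_shift (f : Int → List (String × Int) → List (String × Int)) :
    ∀ (u : List (List (String × Int))) (k : Int),
      (PySem.List.enumerate u (k + 1)).map (fun p => f p.1 p.2)
        = (PySem.List.enumerate u k).map (fun p => f (p.1 + 1) p.2) := by
  intro u
  induction u with
  | nil => intro k; simp [PySem.List.enumerate_nil]
  | cons x u ih =>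
    intro k
    rw [PySem.List.enumerate_cons, PySem.List.enumerate_cons, List.map_cons, List.map_cons,
      ih (k + 1)]

-- on a block whose partition keys all equal k0, specRank is plain enumeration from c k0 + 1
lemma specRank_group (s : String) (pk : List (String × Int) → List Int) (k0 : List Int) :
    ∀ (u : List (List (String × Int))) (c : List Int → Int) (n : Int),
      (∀ y ∈ u, pk y = k0) → c k0 = n →
      specRank s pk u c
        = (PySem.List.enumerate u (n + 1)).map
            (fun p => ((PySem.Dict.mk p.2).insert s p.1).items) := by
  intro u
  induction u with
  | nil => intro c n _ _; simp [specRank, PySem.List.enumerate_nil]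
  | cons x u ih =>
    intro c n hall hc
    have hx : pk x = k0 := hall x (by simp)
    rw [PySem.List.enumerate_cons, List.map_cons]
    show ((PySem.Dict.mk x).insert s (c (pk x) + 1)).items :: _ = _
    rw [hx, hc]
    congr 1
    exact ih _ (n + 1) (fun y hy => hall y (by simp [hy]))
      (by simp [hc])

lemma specRank_append (s : String) (pk : List (String × Int) → List Int) :
    ∀ (u v : List (List (String × Int))) (c : List Int → Int),
      specRank s pk (u ++ v) c
        = specRank s pk u c
          ++ specRank s pk v (fun k => c k + (u.countP (fun e => pk e == k) : Int)) := by
  intro u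
  induction u with
  | nil =>
    intro v c
    simp [specRank]
  | cons d u ih =>
    intro v c
    have hfun : (fun k => (if k = pk d then c k + 1 else c k)
          + (u.countP (fun e => pk e == k) : Int))
        = (fun k => c k + ((d :: u).countP (fun e => pk e == k) : Int)) := by
      funext k
      by_cases hk : k = pk d
      · have h1 : (d :: u).countP (fun e => pk e == k)
            = u.countP (fun e => pk e == k) + 1 := by
          simp [hk]
        rw [h1, if_pos hk]
        push_cast
        ring
      · have h1 : (d :: u).countP (fun e => pk e == k)
            = u.countP (fun e => pk e == k) := by
          simp [beq_eq_false_iff_ne.mpr (fun h => hk h.symm)]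
        rw [h1, if_neg hk]
    rw [List.cons_append]
    show _ :: specRank s pk (u ++ v) _ = _
    rw [ih, hfun]
    rfl

-- A's groupby ranking meets specRank on any list whose partition keys never recur
-- after their contiguous run (which sortedness guarantees)
lemma runs_eq_spec (s : String) (pk : List (String × Int) → List Int)
    (rel : List Int → List Int → Prop)
    (htr : ∀ a b c', rel a b → (b = c' ∨ rel b c') → rel a c')
    (hirr : ∀ a, ¬ rel a a) :
    ∀ (n : Nat) (L : List (List (String × Int))) (c : List Int → Int),
      L.length ≤ n →
      L.Pairwise (fun a b => pk a = pk b ∨ rel (pk a) (pk b)) →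
      (∀ d ∈ L, c (pk d) = 0) →
      (pvRuns pk L).flatMap
        (fun g => (PySem.List.enumerate g 0).map
          (fun p => ((PySem.Dict.mk p.2).insert s (p.1 + 1)).items))
        = specRank s pk L c := by
  intro n
  induction n with
  | zero =>
    intro L c hlen _ _
    have hL : L = [] := List.length_eq_zero_iff.mp (Nat.le_zero.mp hlen)
    subst hL
    simp [pvRuns, specRank]
  | succ n ih =>
    intro L c hlen hpw hc
    cases L with
    | nil => simp [pvRuns, specRank]
    | cons x xs =>
      have hsplit : xs = xs.takeWhile (fun y => pk y == pk x)
          ++ xs.dropWhile (fun y => pk y == pk x) := List.takeWhile_append_dropWhile.symm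
      have hgx : ∀ y ∈ x :: xs.takeWhile (fun y => pk y == pk x), pk y = pk x := by
        intro y hy
        rcases List.mem_cons.mp hy with h | h
        · rw [h]
        · have hb := List.mem_takeWhile_imp (p := fun y => pk y == pk x) h
          exact eq_of_beq (by simpa using hb)
      have hpwxs : xs.Pairwise (fun a b => pk a = pk b ∨ rel (pk a) (pk b)) :=
        (List.pairwise_cons.mp hpw).2
      have hxR : ∀ y ∈ xs, pk x = pk y ∨ rel (pk x) (pk y) :=
        (List.pairwise_cons.mp hpw).1
      have hpwr : (xs.dropWhile (fun y => pk y == pk x)).Pairwise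
          (fun a b => pk a = pk b ∨ rel (pk a) (pk b)) :=
        List.Pairwise.sublist (List.dropWhile_sublist _) hpwxs
      have hrne : ∀ y ∈ xs.dropWhile (fun y => pk y == pk x), pk y ≠ pk x := by
        intro y hy heq
        cases hrc : xs.dropWhile (fun y => pk y == pk x) with
        | nil => rw [hrc] at hy; exact absurd hy (List.not_mem_nil)
        | cons z t =>
          have hz : pk z ≠ pk x := by
            have hw : xs.dropWhile (fun y => pk y == pk x) ≠ [] := by rw [hrc]; simp
            have h2 := List.head_dropWhile_not (fun y => pk y == pk x) hw
            simp only [hrc, List.head_cons] at h2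
            simpa using h2
          have hxz : rel (pk x) (pk z) := by
            have hmem : z ∈ xs := by
              rw [hsplit, hrc]; exact List.mem_append_right _ (by simp)
            rcases hxR z hmem with he | hrel
            · exact absurd he.symm hz
            · exact hrel
          rw [hrc] at hy
          rcases List.mem_cons.mp hy with hyz | hyt
          · rw [hyz] at heq; exact hz heq
          · have hhy : pk z = pk y ∨ rel (pk z) (pk y) := by
              rw [hrc] at hpwr
              exact (List.pairwise_cons.mp hpwr).1 y hyt
            have : rel (pk x) (pk y) := htr _ _ _ hxz hhy
            rw [heq] at this
            exact hirr _ this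
      have hxsplit : x :: xs = (x :: xs.takeWhile (fun y => pk y == pk x))
          ++ xs.dropWhile (fun y => pk y == pk x) := by
        rw [List.cons_append, ← hsplit]
      simp only [pvRuns]
      rw [List.flatMap_cons, hxsplit, specRank_append]
      congr 1
      · rw [specRank_group s pk (pk x) _ c 0 hgx (hc x (by simp)),
          enumerate_shift (fun i d => ((PySem.Dict.mk d).insert s i).items) _ 0]
      · apply ih
        · have h1 := List.length_dropWhile_le (fun y => pk y == pk x) xs
          have h2 : xs.length + 1 ≤ n + 1 := by simpa using hlen
          omega
        · exact hpwr
        · intro d hd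
          have hd0 : c (pk d) = 0 := by
            apply hc
            rw [hxsplit]
            exact List.mem_append_right _ hd
          have hcnt : (x :: xs.takeWhile (fun y => pk y == pk x)).countP
              (fun e => pk e == pk d) = 0 := by
            rw [List.countP_eq_zero]
            intro e he
            have hex : pk e = pk x := hgx e he
            simp only [hex, beq_iff_eq]
            exact fun hco => hrne d hd hco.symm
          show _ + _ = (0 : Int)
          rw [hcnt, hd0]
          simp

-- B's counter loop meets specRank: the dict holds exactly the counting function
lemma foldB_eq_spec (s : String) (pk : List (String × Int) → List Int) :
    ∀ (L : List (List (String × Int))) (cd : PySem.Dict (List Int) Int)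
      (acc : List (List (String × Int))) (c : List Int → Int),
      (∀ k, cd.getD k 0 = c k) →
      (L.foldl
        (fun st d =>
          (st.1.insert (pk d) (st.1.getD (pk d) 0 + 1),
           st.2 ++ [((PySem.Dict.mk d).insert s (st.1.getD (pk d) 0 + 1)).items]))
        (cd, acc)).2
      = acc ++ specRank s pk L c := by
  intro L
  induction L with
  | nil => intro cd acc c _; simp [specRank]
  | cons d L ih =>
    intro cd acc c hinv
    rw [List.foldl_cons]
    have h1 : cd.getD (pk d) 0 = c (pk d) := hinv _
    show ((L.foldl _ (cd.insert (pk d) (cd.getD (pk d) 0 + 1),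
      acc ++ [((PySem.Dict.mk d).insert s (cd.getD (pk d) 0 + 1)).items]))).2 = _
    rw [h1, ih _ _ (fun k => if k = pk d then c k + 1 else c k) ?_]
    · simp [specRank]
    · intro k
      rw [PySem.Dict.getD_insert]
      by_cases hk : k = pk d <;> simp [hk, hinv]

-- PySem.List.sorted elaborated under Mathlib's LinearOrder (List Int) is the same function
-- as under the core LT instance (the Decidable witnesses are a subsingleton)
lemma sorted_instances (dl : List (List (String × Int)))
    (k : List (String × Int) → List Int) (rev : Bool) :
    @PySem.List.sorted (List (String × Int)) (List Int) List.instLinearOrder.toLT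
      LinearOrder.toDecidableLT dl k rev
    = PySem.List.sorted dl k rev := by
  have h : (LinearOrder.toDecidableLT :
      DecidableRel (@LT.lt (List Int) List.instLinearOrder.toLT))
      = (fun a b => a.decidableLT b) := by
    funext a b
    exact Subsingleton.elim _ _
  rw [h]

-- both rank assignments agree on the sorted list, for either sort direction
lemma ranked_eq (s : String) (pb ob : List String) (rev : Bool)
    (dl : List (List (String × Int))) :
    (if pb ≠ [] then
      (pvRuns (pvKey pb) (PySem.List.sorted dl (pvKey (pb ++ ob)) rev)).flatMap
        (fun g => (PySem.List.enumerate g 0).map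
          (fun p => ((PySem.Dict.mk p.2).insert s (p.1 + 1)).items))
    else
      (PySem.List.enumerate (PySem.List.sorted dl (pvKey (pb ++ ob)) rev) 0).map
        (fun p => ((PySem.Dict.mk p.2).insert s (p.1 + 1)).items))
    = ((PySem.List.sorted dl (pvKey (pb ++ ob)) rev).foldl
        (fun st d =>
          (st.1.insert (pvKey pb d) (st.1.getD (pvKey pb d) 0 + 1),
           st.2 ++ [((PySem.Dict.mk d).insert s (st.1.getD (pvKey pb d) 0 + 1)).items]))
        ((PySem.Dict.empty : PySem.Dict (List Int) Int), [])).2 := by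
  rw [foldB_eq_spec s (pvKey pb) _ PySem.Dict.empty [] (fun _ => 0)
    (fun k => PySem.Dict.getD_empty k 0), List.nil_append]
  by_cases hpb : pb = []
  · rw [if_neg (by simp [hpb])]
    subst hpb
    rw [specRank_group s (pvKey []) [] _ (fun _ => 0) 0 (fun y _ => rfl) rfl,
      enumerate_shift (fun i d => ((PySem.Dict.mk d).insert s i).items) _ 0]
  · rw [if_pos hpb]
    have hkey : ∀ a b : List (String × Int),
        pvKey (pb ++ ob) a ≤ pvKey (pb ++ ob) b → pvKey pb a ≤ pvKey pb b := by
      intro a b hab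
      rw [pvKey_take pb ob a, pvKey_take pb ob b]
      exact take_le_of_le pb.length _ _ hab
    cases rev with
    | false =>
      have htr' : ∀ a b c' : List Int, a < b → (b = c' ∨ b < c') → a < c' := by
        intro a b c' hab hbc
        rcases hbc with rfl | hbc
        · exact hab
        · exact hab.trans hbc
      have hpw' : (PySem.List.sorted dl (pvKey (pb ++ ob)) false).Pairwise
          (fun a b => pvKey pb a = pvKey pb b ∨ pvKey pb a < pvKey pb b) := by
        rw [← sorted_instances]
        exact (PySem.List.sorted_pairwise dl (pvKey (pb ++ ob))).imp
          (fun hab => (hkey _ _ hab).lt_or_eq.symm)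
      exact runs_eq_spec s (pvKey pb) (fun u v => u < v) htr' (fun a => lt_irrefl a)
        _ _ (fun _ => 0) le_rfl hpw' (fun _ _ => rfl)
    | true =>
      have htr' : ∀ a b c' : List Int, b < a → (b = c' ∨ c' < b) → c' < a := by
        intro a b c' hab hbc
        rcases hbc with rfl | hbc
        · exact hab
        · exact hbc.trans hab
      have hpw' : (PySem.List.sorted dl (pvKey (pb ++ ob)) true).Pairwise
          (fun a b => pvKey pb a = pvKey pb b ∨ pvKey pb b < pvKey pb a) := by
        rw [← sorted_instances]
        exact (PySem.List.sorted_pairwise_rev dl (pvKey (pb ++ ob))).imp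
          (fun hab => (hkey _ _ hab).lt_or_eq.symm.imp Eq.symm id)
      exact runs_eq_spec s (pvKey pb) (fun u v => v < u) htr' (fun a => lt_irrefl a)
        _ _ (fun _ => 0) le_rfl hpw' (fun _ _ => rfl)

-- ===== VERDICT (by name: the statement is the Claim_ definition above) =====
theorem rank_dict_list_spec : Claim_equal_rank_dict_list := by
  intro dl order_by asc partition_by name _ _
  unfold Spec_rank_dict_list
  cases name with
  | none => cases asc <;> rfl
  | some s =>
    by_cases hs : s = ""
    · subst hs; cases asc <;> rfl
    · simp only [rank_dict_list, rank_dict_list_alt]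
      rw [if_neg hs, if_neg hs]
      cases asc
      · exact ranked_eq s partition_by order_by true dl
      · exact ranked_eq s partition_by order_by false dl
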